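-- pv_equiv track=rewrite | github.com/gotlibsh/aoc2023 | solution/25.py | find_row_reflection
-- ===== SOURCE A (Python) =====
-- from itertools import pairwise
--
-- def find_row_reflection(note):
--     for i, (r1, r2) in enumerate(pairwise(note)):
--         if r1 == r2:
--             upper = reversed(note[:i])
--             lower = note[i+2:]
--
--             if all(ri == rj for ri, rj in zip(upper, lower)):
--                 return i + 1
--
--     return 0
-- ===== SOURCE B (Python) =====
-- def find_row_reflection(note):
--     # Exact positional-number-system ("perfect hash") approach: intern rows to
--     # small int digits, encode every prefix of the id sequence as an exact
--     # base-2**s integer (forward and reversed, s wide enough that each digit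
--     # fits), and test each mirror line with one big-int shift/compare instead
--     # of comparing rows pairwise.  Exact because digits are < 2**s, so equal
--     # values imply equal digit sequences.
--     d = {}
--     ids = []
--     for r in note:
--         if r not in d:
--             d[r] = len(d)
--         ids.append(d[r])
--     n = len(ids)
--     s = (n + 1).bit_length()
--     f = g = 0
--     F, G = [0], [0]
--     for k, x in enumerate(ids):
--         f = (f << s) + x       # big-endian value of prefix
--         g = g + (x << (k * s))  # little-endian value of prefix
--         F.append(f)
--         G.append(g)
--     for j in range(1, n):
--         m = min(j, n - j)
--         # value of reversed ids[j-m:j]  ==  value of ids[j:j+m], scaled to match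
--         if G[j] - G[j - m] == (F[j + m] - (F[j] << (m * s))) << ((j - m) * s):
--             return j
--     return 0
-- ===== Notes on version B (the rewrite author's own statement) =====
-- stated objective: alternative
-- what changed: B replaces A's per-axis pairwise row comparisons by an exact positional-number-system encoding: rows are interned to small int digits, every prefix of the digit sequence is encoded once as an exact base-2^s big integer (forward and reversed), and each candidate mirror line is then tested with a single big-integer shift-and-compare equation; exactness holds because all digits are < 2^s.
import Mathlib
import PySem

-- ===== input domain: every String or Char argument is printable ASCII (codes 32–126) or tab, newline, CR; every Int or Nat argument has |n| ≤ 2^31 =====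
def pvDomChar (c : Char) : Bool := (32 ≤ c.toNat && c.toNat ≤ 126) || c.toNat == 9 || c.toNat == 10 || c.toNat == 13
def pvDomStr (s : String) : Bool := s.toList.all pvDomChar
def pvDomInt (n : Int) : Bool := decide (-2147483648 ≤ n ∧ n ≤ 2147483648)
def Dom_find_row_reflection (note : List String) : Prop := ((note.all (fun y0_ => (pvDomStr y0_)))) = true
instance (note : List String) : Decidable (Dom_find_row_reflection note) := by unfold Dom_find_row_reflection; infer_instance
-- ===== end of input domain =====

-- B interns rows to small ints and encodes prefixes as exact base-(n+1) integers,
-- testing each mirror line with one arithmetic equation instead of comparing rows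
-- pairwise (alternative algorithm; return value proved equal).

-- ===== PORT A =====
-- loop over enumerate(pairwise(note)); i ≥ 0 always, so note[:i] = take i.toNat, note[i+2:] = drop (i.toNat+2)
def pvALoop (note : List String) : List (Int × (String × String)) → Int
  | [] => 0
  | (i, (r1, r2)) :: rest =>
      if r1 == r2 then
        let upper := (note.take i.toNat).reverse
        let lower := note.drop (i.toNat + 2)
        if (upper.zip lower).all (fun p => p.1 == p.2) then i + 1
        else pvALoop note rest
      else pvALoop note rest

def find_row_reflection (note : List String) : Int :=
  pvALoop note (PySem.List.enumerate (note.zip note.tail) 0)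

-- ===== PORT B =====
-- the interning pass: for r in note: if r not in d: d[r] = len(d); ids.append(d[r])
-- (d[r] cannot raise: r is always a key here, so getD's default is never used)
def pvBIntern : List String → PySem.Dict String Int → List Int → List Int
  | [], _, ids => ids
  | r :: rest, d, ids =>
      let d' := if d.contains r then d else d.insert r (d.size : Int)
      pvBIntern rest d' (ids ++ [d'.getD r 0])

-- (n+1).bit_length(), transliterated: 0 for 0, else bit_length(m // 2) + 1
def pvBitLength : Nat → Nat
  | 0 => 0
  | m + 1 => pvBitLength ((m + 1) / 2) + 1
decreasing_by exact Nat.div_lt_self (Nat.succ_pos m) (by omega)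

-- the prefix-encoding pass: f = (f << s) + x; g = g + (x << (k*s)); append to F, G
-- (Python's 'a << k' on ints is exactly a * 2^k; ported as such)
def pvBuild (s : Nat) : List Int → Nat → Int → Int → List Int → List Int →
    List Int × List Int
  | [], _, _, _, F, G => (F, G)
  | x :: rest, k, f, g, F, G =>
      pvBuild s rest (k + 1) (f * 2 ^ s + x) (g + x * 2 ^ (k * s))
        (F ++ [f * 2 ^ s + x]) (G ++ [g + x * 2 ^ (k * s)])

-- for j in range(1, n): m = min(j, n-j);
--   if G[j]-G[j-m] == (F[j+m] - (F[j] << m*s)) << (j-m)*s: return j   ('<<' = * 2^·)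
def pvBLoop (s : Nat) (F G : List Int) (n j : Nat) : Int :=
  if j < n then
    let m := min j (n - j)
    if G.getD j 0 - G.getD (j - m) 0 ==
        (F.getD (j + m) 0 - F.getD j 0 * 2 ^ (m * s)) * 2 ^ ((j - m) * s) then (j : Int)
    else pvBLoop s F G n (j + 1)
  else 0
termination_by n - j

def find_row_reflection_alt (note : List String) : Int :=
  let ids := pvBIntern note PySem.Dict.empty []
  let n := ids.length
  let s := pvBitLength (n + 1)
  let FG := pvBuild s ids 0 0 0 [0] [0]
  pvBLoop s FG.1 FG.2 n 1

-- ===== PRECONDITION & SPEC =====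
def Spec_find_row_reflection (note : List String) (out : Int) : Prop := out = find_row_reflection_alt note
instance (note : List String) (out : Int) : Decidable (Spec_find_row_reflection note out) := by unfold Spec_find_row_reflection; infer_instance

-- ===== CLAIM (what is proved, stated in full; the proofs are below) =====
def Claim_equal_find_row_reflection : Prop := ∀ (note : List String), Dom_find_row_reflection note → Spec_find_row_reflection note (find_row_reflection note)

-- ===== LEMMAS AND PROOFS =====

-- the shared mirror condition, on getD-indexed lists
def pvMirror (note : List String) (j : Nat) : Prop :=
  ∀ s, s < min j (note.length - j) → note.getD (j - 1 - s) "" = note.getD (j + s) ""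

-- big-endian / little-endian values of a digit list
def pvValBE (b : Int) (l : List Int) : Int := l.foldl (fun a d => a * b + d) 0

def pvValLE (b : Int) : List Int → Int
  | [] => 0
  | d :: t => d + b * pvValLE b t

theorem pvValBE_foldl (b a : Int) (l : List Int) :
    l.foldl (fun a d => a * b + d) a = a * b ^ l.length + pvValBE b l := by
  induction l generalizing a with
  | nil => simp [pvValBE]
  | cons d t ih =>
      simp only [List.foldl_cons, List.length_cons, pvValBE]
      rw [ih (a * b + d), ih (0 * b + d)]
      ring

theorem pvValBE_append (b : Int) (u v : List Int) :
    pvValBE b (u ++ v) = pvValBE b u * b ^ v.length + pvValBE b v := by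
  unfold pvValBE
  rw [List.foldl_append, pvValBE_foldl]
  rfl

theorem pvValLE_append (b : Int) (u v : List Int) :
    pvValLE b (u ++ v) = pvValLE b u + b ^ u.length * pvValLE b v := by
  induction u with
  | nil => simp [pvValLE]
  | cons d t ih =>
      simp only [List.cons_append, pvValLE, List.length_cons, ih]
      ring

theorem pvValBE_reverse (b : Int) (l : List Int) :
    pvValBE b l.reverse = pvValLE b l := by
  induction l with
  | nil => simp [pvValBE, pvValLE]
  | cons d t ih =>
      rw [List.reverse_cons, pvValBE_append, ih]
      simp [pvValBE, pvValLE]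
      ring

theorem pvValLE_inj (b : Int) (hb : 0 < b) (u v : List Int)
    (hl : u.length = v.length)
    (hu : ∀ x ∈ u, 0 ≤ x ∧ x < b) (hv : ∀ x ∈ v, 0 ≤ x ∧ x < b)
    (h : pvValLE b u = pvValLE b v) : u = v := by
  induction u generalizing v with
  | nil => cases v with
      | nil => rfl
      | cons _ _ => simp at hl
  | cons d t ih =>
      cases v with
      | nil => simp at hl
      | cons e s =>
          simp only [pvValLE] at h
          obtain ⟨hd0, hdb⟩ := hu d (by simp)
          obtain ⟨he0, heb⟩ := hv e (by simp)
          have hde : d = e := by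
            have h1 : d % b = d := Int.emod_eq_of_lt hd0 hdb
            have h2 : e % b = e := Int.emod_eq_of_lt he0 heb
            have : (d + b * pvValLE b t) % b = (e + b * pvValLE b s) % b := by rw [h]
            rwa [Int.add_mul_emod_self_left, Int.add_mul_emod_self_left, h1, h2] at this
          subst hde
          have hts : pvValLE b t = pvValLE b s := by
            have hb' : b ≠ 0 := ne_of_gt hb
            have := h
            have h' : b * pvValLE b t = b * pvValLE b s := by omega
            exact mul_left_cancel₀ hb' h'
          have := ih s (by simpa using hl) (fun x hx => hu x (by simp [hx]))
            (fun x hx => hv x (by simp [hx])) hts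
          rw [this]

-- the prefix-encoding arrays as maps
def pvFof (b : Int) (l : List Int) : List Int :=
  (List.range (l.length + 1)).map (fun j => pvValBE b (l.take j))
def pvGof (b : Int) (l : List Int) : List Int :=
  (List.range (l.length + 1)).map (fun j => pvValLE b (l.take j))
theorem pvBuild_eq (s : Nat) (rest : List Int) : ∀ pref : List Int,
    pvBuild s rest pref.length (pvValBE ((2:Int) ^ s) pref) (pvValLE ((2:Int) ^ s) pref)
      (pvFof ((2:Int) ^ s) pref) (pvGof ((2:Int) ^ s) pref)
    = (pvFof ((2:Int) ^ s) (pref ++ rest), pvGof ((2:Int) ^ s) (pref ++ rest)) := by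
  set b : Int := (2:Int) ^ s with hbdef
  induction rest with
  | nil => intro pref; simp [pvBuild]
  | cons x rest ih =>
      intro pref
      have hf : pvValBE b pref * 2 ^ s + x = pvValBE b (pref ++ [x]) := by
        rw [pvValBE_append]; simp [pvValBE, hbdef]
      have hpw : (2:Int) ^ (pref.length * s) = b ^ pref.length := by
        rw [hbdef, ← pow_mul, Nat.mul_comm]
      have hg : pvValLE b pref + x * 2 ^ (pref.length * s) = pvValLE b (pref ++ [x]) := by
        rw [pvValLE_append, hpw]; simp [pvValLE]; ring
      have hF : pvFof b pref ++ [pvValBE b (pref ++ [x])] = pvFof b (pref ++ [x]) := by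
        unfold pvFof
        simp only [List.length_append, List.length_cons, List.length_nil]
        rw [List.range_succ (n := pref.length + 1), List.map_append]
        congr 1
        · apply List.map_congr_left
          intro j hj
          rw [List.mem_range] at hj
          rw [List.take_append_of_le_length (by omega)]
        · simp only [List.map_cons, List.map_nil]
          rw [List.take_of_length_le (by simp)]
      have hG : pvGof b pref ++ [pvValLE b (pref ++ [x])] = pvGof b (pref ++ [x]) := by
        unfold pvGof
        simp only [List.length_append, List.length_cons, List.length_nil]
        rw [List.range_succ (n := pref.length + 1), List.map_append]
        congr 1
        · apply List.map_congr_left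
          intro j hj
          rw [List.mem_range] at hj
          rw [List.take_append_of_le_length (by omega)]
        · simp only [List.map_cons, List.map_nil]
          rw [List.take_of_length_le (by simp)]
      show pvBuild s (x :: rest) _ _ _ _ _ = _
      rw [pvBuild]
      rw [hf, hg, hF, hG]
      have hlen1 : pref.length + 1 = (pref ++ [x]).length := by simp
      rw [hlen1, ih (pref ++ [x])]
      simp [List.append_assoc]

theorem pvFof_getD (b : Int) (l : List Int) (j : Nat) (hj : j ≤ l.length) :
    (pvFof b l).getD j 0 = pvValBE b (l.take j) := by
  unfold pvFof
  rw [List.getD_eq_getElem _ _ (by simp; omega)]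
  simp

theorem pvGof_getD (b : Int) (l : List Int) (j : Nat) (hj : j ≤ l.length) :
    (pvGof b l).getD j 0 = pvValLE b (l.take j) := by
  unfold pvGof
  rw [List.getD_eq_getElem _ _ (by simp; omega)]
  simp

theorem pvBitLength_lt (m : Nat) : m < 2 ^ pvBitLength m := by
  induction m using Nat.strong_induction_on with
  | _ m ih =>
    match m with
    | 0 => simp [pvBitLength]
    | m + 1 =>
        rw [pvBitLength]
        have h := ih ((m + 1) / 2) (Nat.div_lt_self (Nat.succ_pos m) (by omega))
        rw [pow_succ]
        omega

-- dict invariant: keys nodup, values in [0, size), get? injective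
def pvGoodD (d : PySem.Dict String Int) : Prop :=
  d.keys.Nodup ∧ (∀ k v, d.get? k = some v → 0 ≤ v ∧ v < (d.size : Int)) ∧
  (∀ k1 k2 v, d.get? k1 = some v → d.get? k2 = some v → k1 = k2)

-- intern invariant
def pvInv (d : PySem.Dict String Int) (ids : List Int) (prev : List String) : Prop :=
  ids.length = prev.length ∧ pvGoodD d ∧ d.size ≤ prev.length ∧
  ∀ k, k < prev.length → d.get? (prev.getD k "") = some (ids.getD k 0)

theorem pvInv_step (d : PySem.Dict String Int) (ids : List Int) (prev : List String) (r : String)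
    (h : pvInv d ids prev) :
    pvInv (if d.contains r then d else d.insert r (d.size : Int))
      (ids ++ [(if d.contains r then d else d.insert r (d.size : Int)).getD r 0])
      (prev ++ [r]) := by
  obtain ⟨hlen, ⟨hnd, hbnd, hinj⟩, hsz, hget⟩ := h
  by_cases hc : d.contains r = true
  · simp only [hc, if_true]
    refine ⟨by simp [hlen], ⟨hnd, hbnd, hinj⟩, by simp; omega, ?_⟩
    intro k hk
    rcases Nat.lt_or_ge k prev.length with hk' | hk'
    · rw [List.getD_append _ _ _ _ hk', List.getD_append _ _ _ _ (by omega)]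
      exact hget k hk'
    · have hke : k = prev.length := by simp at hk; omega
      subst hke
      rw [List.getD_append_right _ _ _ _ (le_refl _), List.getD_append_right _ _ _ _ (by omega)]
      simp only [hlen, Nat.sub_self, List.getD_cons_zero]
      have : (d.get? r).isSome := by rw [← PySem.Dict.contains_eq_isSome_get?]; exact hc
      obtain ⟨v, hv⟩ := Option.isSome_iff_exists.mp this
      rw [hv, PySem.Dict.getD_of_get?_eq_some _ _ hv]
  · rw [Bool.not_eq_true] at hc
    simp only [hc, Bool.false_eq_true, if_false]
    have hfresh : d.get? r = none := by
      rcases hh : d.get? r with _ | v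
      · rfl
      · rw [PySem.Dict.contains_eq_isSome_get?, hh] at hc; cases hc
    have hsize : (d.insert r (d.size : Int)).size = d.size + 1 := by
      rw [PySem.Dict.size_insert]; simp [hc, Bool.false_eq_true]
    have hget' : ∀ k, (d.insert r (d.size : Int)).get? k = if k = r then some (d.size : Int) else d.get? k := by
      intro k
      by_cases hk : k = r
      · subst hk; simp [PySem.Dict.get?_insert_self]
      · simp [hk, PySem.Dict.get?_insert_of_ne _ _ hk]
    refine ⟨by simp [hlen], ⟨?_, ?_, ?_⟩, by rw [hsize]; simp; omega, ?_⟩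
    · exact PySem.Dict.nodup_keys_insert _ _ _ hnd
    · intro k v hv
      rw [hget'] at hv
      split_ifs at hv with hk
      · cases hv; constructor <;> [positivity; simp [hsize]]
      · obtain ⟨h1, h2⟩ := hbnd k v hv
        refine ⟨h1, by push_cast [hsize]; omega⟩
    · intro k1 k2 v h1 h2
      rw [hget'] at h1 h2
      split_ifs at h1 h2 with e1 e2 e2
      · rw [e1, e2]
      · cases h1; exact absurd ((hbnd _ _ h2).2) (by simp)
      · cases h2; exact absurd ((hbnd _ _ h1).2) (by simp)
      · exact hinj _ _ _ h1 h2
    · intro k hk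
      rcases Nat.lt_or_ge k prev.length with hk' | hk'
      · rw [List.getD_append _ _ _ _ hk', List.getD_append _ _ _ _ (by omega)]
        have hkey := hget k hk'
        have hne : prev.getD k "" ≠ r := by
          intro e; rw [e, hfresh] at hkey; cases hkey
        rw [PySem.Dict.get?_insert_of_ne _ _ hne]
        exact hkey
      · have hke : k = prev.length := by simp at hk; omega
        subst hke
        rw [List.getD_append_right _ _ _ _ (le_refl _), List.getD_append_right _ _ _ _ (by omega)]
        simp only [hlen, Nat.sub_self, List.getD_cons_zero]
        rw [PySem.Dict.getD_of_get?_eq_some _ _ (PySem.Dict.get?_insert_self _ _ _),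
            PySem.Dict.get?_insert_self]

theorem pvIntern_inv (l : List String) (d : PySem.Dict String Int) (ids : List Int) (prev : List String)
    (h : pvInv d ids prev) :
    ∃ dF, pvInv dF (pvBIntern l d ids) (prev ++ l) := by
  induction l generalizing d ids prev with
  | nil => exact ⟨d, by simpa using h⟩
  | cons r rest ih =>
      obtain ⟨dF, hF⟩ := ih _ _ _ (pvInv_step d ids prev r h)
      exact ⟨dF, by simpa [List.append_assoc] using hF⟩

theorem pvIntern_spec (note : List String) :
    (pvBIntern note PySem.Dict.empty []).length = note.length ∧
    (∀ a b, a < note.length → b < note.length →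
      ((pvBIntern note PySem.Dict.empty []).getD a 0 = (pvBIntern note PySem.Dict.empty []).getD b 0
        ↔ note.getD a "" = note.getD b "")) ∧
    (∀ x ∈ pvBIntern note PySem.Dict.empty [], 0 ≤ x ∧ x < (note.length : Int) + 1) := by
  have hbase : pvInv PySem.Dict.empty [] [] := by
    refine ⟨rfl, ⟨by simp [PySem.Dict.keys_empty], ?_, ?_⟩, by simp [PySem.Dict.size_empty], by intro k hk; cases hk⟩
    · intro k v hv; rw [PySem.Dict.get?_empty] at hv; cases hv
    · intro k1 k2 v h1 _; rw [PySem.Dict.get?_empty] at h1; cases h1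
  obtain ⟨dF, hlen, ⟨_, hbnd, hinj⟩, hsz, hget⟩ := pvIntern_inv note PySem.Dict.empty [] [] hbase
  simp only [List.nil_append] at hlen hsz hget
  refine ⟨hlen, ?_, ?_⟩
  · intro a b ha hb
    have hga := hget a ha
    have hgb := hget b hb
    constructor
    · intro he
      rw [he] at hga
      exact hinj _ _ _ hga hgb
    · intro he
      rw [he] at hga
      rw [hga] at hgb
      exact Option.some_injective _ hgb
  · intro x hx
    obtain ⟨k, hk, rfl⟩ := List.mem_iff_getElem.mp hx
    have hk' : k < note.length := by rwa [hlen] at hk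
    have hgd : (pvBIntern note PySem.Dict.empty []).getD k 0
        = (pvBIntern note PySem.Dict.empty [])[k] := List.getD_eq_getElem _ _ hk
    have := hbnd _ _ (hget k hk')
    rw [hgd] at this
    refine ⟨this.1, lt_of_lt_of_le this.2 ?_⟩
    omega

-- B's slice equality ↔ pointwise mirror on ids
theorem pvListEq_iff_getD (m : Nat) (a b : List Int) (ha : a.length = m) (hb : b.length = m) :
    a = b ↔ ∀ t, t < m → a.getD t 0 = b.getD t 0 := by
  constructor
  · intro h t _; rw [h]
  · intro h
    apply List.ext_getElem (by omega)
    intro i h1 h2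
    have := h i (by omega)
    rwa [List.getD_eq_getElem _ _ h1, List.getD_eq_getElem _ _ h2] at this

theorem pvSlice_iff (ids : List Int) (n j : Nat) (hn : n = ids.length) (h1 : 1 ≤ j) (hj : j < n) :
    ((ids.take j).drop (j - min j (n - j))) = (((ids.drop j).take (min j (n - j))).reverse)
    ↔ ∀ s, s < min j (n - j) → ids.getD (j - 1 - s) 0 = ids.getD (j + s) 0 := by
  set m := min j (n - j) with hm
  have hm1 : m ≤ j := Nat.min_le_left _ _
  have hm2 : m ≤ n - j := Nat.min_le_right _ _
  have hL : ((ids.take j).drop (j - m)).length = m := by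
    simp [List.length_drop, List.length_take]; omega
  have hR : ((((ids.drop j).take m)).reverse).length = m := by
    simp [List.length_reverse, List.length_take, List.length_drop]; omega
  have eL : ∀ t, t < m → ((ids.take j).drop (j - m)).getD t 0 = ids.getD (j - m + t) 0 := by
    intro t ht
    rw [List.getD_eq_getElem _ _ (by omega), List.getD_eq_getElem _ _ (by omega)]
    rw [List.getElem_drop, List.getElem_take]
  have eR : ∀ t, t < m → ((((ids.drop j).take m)).reverse).getD t 0 = ids.getD (j + (m - 1 - t)) 0 := by
    intro t ht
    have hlen : (((ids.drop j).take m)).length = m := by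
      simp [List.length_take, List.length_drop]; omega
    rw [List.getD_eq_getElem _ _ (by omega)]
    rw [List.getElem_reverse]
    rw [List.getElem_take, List.getElem_drop]
    rw [List.getD_eq_getElem _ _ (by omega)]
    congr 1
    omega
  rw [pvListEq_iff_getD m _ _ hL hR]
  constructor
  · intro h s hs
    have := h (m - 1 - s) (by omega)
    rw [eL _ (by omega), eR _ (by omega)] at this
    have e1 : j - m + (m - 1 - s) = j - 1 - s := by omega
    have e2 : m - 1 - (m - 1 - s) = s := by omega
    rwa [e1, e2] at this
  · intro h t ht
    rw [eL _ ht, eR _ ht]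
    have := h (m - 1 - t) (by omega)
    have e1 : j - 1 - (m - 1 - t) = j - m + t := by omega
    rwa [e1] at this

-- the arithmetic test ↔ slice equality (exact: digits < base)
theorem pvCondNum_iff (b : Int) (ids : List Int) (n j : Nat)
    (hn : n = ids.length) (hb : (0:Int) < b)
    (hdig : ∀ x ∈ ids, 0 ≤ x ∧ x < b)
    (h1 : 1 ≤ j) (hj : j < n) :
    (pvValLE b (ids.take j) - pvValLE b (ids.take (j - min j (n - j)))
      = (pvValBE b (ids.take (j + min j (n - j))) - pvValBE b (ids.take j) * b ^ (min j (n - j)))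
          * b ^ (j - min j (n - j)))
    ↔ ((ids.take j).drop (j - min j (n - j))) = (((ids.drop j).take (min j (n - j))).reverse) := by
  set m := min j (n - j) with hm
  have hm1 : m ≤ j := Nat.min_le_left _ _
  have hm2 : m ≤ n - j := Nat.min_le_right _ _
  set seg1 := (ids.take j).drop (j - m) with hseg1
  set seg2 := (ids.drop j).take m with hseg2
  have hA1 : ids.take j = ids.take (j - m) ++ seg1 := by
    rw [hseg1]
    conv_lhs => rw [← List.take_append_drop (j - m) (ids.take j)]
    rw [List.take_take, Nat.min_eq_left (by omega)]
  have hL1 : (ids.take (j - m)).length = j - m := by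
    simp [List.length_take]; omega
  have hA3 : ids.take (j + m) = ids.take j ++ seg2 := by
    rw [List.take_add]
  have hs1 : seg1.length = m := by
    simp [hseg1, List.length_drop, List.length_take]; omega
  have hs2 : seg2.length = m := by
    simp [hseg2, List.length_take, List.length_drop]; omega
  have hLj : (ids.take j).length = j := by
    simp [List.length_take]; omega
  have hlhs : pvValLE b (ids.take j) - pvValLE b (ids.take (j - m))
      = b ^ (j - m) * pvValLE b seg1 := by
    conv_lhs => rw [hA1]
    rw [pvValLE_append, hL1]
    ring
  have hrhs : pvValBE b (ids.take (j + m)) - pvValBE b (ids.take j) * b ^ m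
      = pvValLE b seg2.reverse := by
    conv_lhs => rw [hA3]
    rw [pvValBE_append, hs2, ← pvValBE_reverse b seg2.reverse, List.reverse_reverse]
    ring
  rw [hlhs, hrhs]
  have hpow : (0:Int) < b ^ (j - m) := pow_pos hb _
  constructor
  · intro h
    have hval : pvValLE b seg1 = pvValLE b seg2.reverse := by
      have h' : b ^ (j - m) * pvValLE b seg1 = b ^ (j - m) * pvValLE b seg2.reverse := by
        rw [h]; ring
      exact mul_left_cancel₀ (ne_of_gt hpow) h'
    refine pvValLE_inj b hb _ _ (by rw [hs1]; simp [hs2]) ?_ ?_ hval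
    · intro x hx
      exact hdig x (List.mem_of_mem_take (List.mem_of_mem_drop hx))
    · intro x hx
      rw [List.mem_reverse] at hx
      exact hdig x (List.mem_of_mem_drop (List.mem_of_mem_take hx))
  · intro h
    rw [h]
    ring

-- A's element at the pair list
theorem pvPairs_getElem (note : List String) (k : Nat) (h : k < (note.zip note.tail).length) :
    (PySem.List.enumerate (note.zip note.tail) 0)[k]'(by simpa [PySem.List.length_enumerate] using h)
      = ((k : Int), (note.getD k "", note.getD (k+1) "")) := by
  have hk : k < note.length ∧ k + 1 < note.length := by
    simp [List.length_zip, List.length_tail] at h; omega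
  rw [PySem.List.getElem_enumerate]
  rw [List.getElem_zip, List.getElem_tail]
  rw [List.getD_eq_getElem _ _ hk.1, List.getD_eq_getElem _ _ hk.2]
  simp

-- A's condition ↔ pvMirror
theorem pvCondA_iff (note : List String) (j : Nat) (h1 : 1 ≤ j) (hj : j < note.length) :
    ((note.getD (j-1) "" == note.getD j "") = true ∧
      (((note.take (j-1)).reverse.zip (note.drop (j+1))).all (fun p => p.1 == p.2)) = true)
    ↔ pvMirror note j := by
  set n := note.length with hn
  have hzl : ((note.take (j-1)).reverse.zip (note.drop (j+1))).length = min (j-1) (n-j-1) := by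
    simp [List.length_zip, List.length_reverse, List.length_take, List.length_drop]
    omega
  have hel : ∀ t, t < min (j-1) (n-j-1) →
      ∀ (h : t < ((note.take (j-1)).reverse.zip (note.drop (j+1))).length),
      ((note.take (j-1)).reverse.zip (note.drop (j+1)))[t]
        = (note.getD (j-2-t) "", note.getD (j+1+t) "") := by
    intro t ht h
    rw [List.getElem_zip, List.getElem_reverse, List.getElem_take, List.getElem_drop]
    rw [List.getD_eq_getElem _ _ (by omega), List.getD_eq_getElem _ _ (by omega)]
    congr 2
    simp [List.length_take]
    omega
  have hall : (((note.take (j-1)).reverse.zip (note.drop (j+1))).all (fun p => p.1 == p.2)) = true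
      ↔ ∀ t, t < min (j-1) (n-j-1) → note.getD (j-2-t) "" = note.getD (j+1+t) "" := by
    rw [List.all_eq_true]
    constructor
    · intro h t ht
      have := h _ (List.getElem_mem (by omega : t < ((note.take (j-1)).reverse.zip (note.drop (j+1))).length))
      rw [hel t ht (by omega)] at this
      exact beq_iff_eq.mp this
    · intro h x hx
      obtain ⟨i, hi, rfl⟩ := List.mem_iff_getElem.mp hx
      rw [hel i (by omega) hi]
      exact beq_iff_eq.mpr (h i (by omega))
  rw [beq_iff_eq, hall]
  unfold pvMirror
  constructor
  · rintro ⟨h0, hrest⟩ s hs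
    match s with
    | 0 => simpa using h0
    | t + 1 =>
        have := hrest t (by omega)
        have e1 : j - 2 - t = j - 1 - (t+1) := by omega
        have e2 : j + 1 + t = j + (t+1) := by omega
        rwa [e1, e2] at this
  · intro h
    refine ⟨by simpa using h 0 (by omega), ?_⟩
    intro t ht
    have := h (t+1) (by omega)
    have e1 : j - 1 - (t+1) = j - 2 - t := by omega
    have e2 : j + (t+1) = j + 1 + t := by omega
    rwa [e1, e2] at this

-- the main loop correspondence
theorem pvLoop_eq (note : List String) (ids : List Int) (s : Nat)
    (hlen : ids.length = note.length)
    (hiff : ∀ a b, a < note.length → b < note.length →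
      (ids.getD a 0 = ids.getD b 0 ↔ note.getD a "" = note.getD b ""))
    (hdig : ∀ x ∈ ids, 0 ≤ x ∧ x < (2:Int) ^ s) :
    ∀ j, 1 ≤ j →
      pvALoop note ((PySem.List.enumerate (note.zip note.tail) 0).drop (j-1))
        = pvBLoop s (pvFof ((2:Int) ^ s) ids) (pvGof ((2:Int) ^ s) ids) note.length j := by
  set b : Int := (2:Int) ^ s with hbdef
  have hb : (0:Int) < b := by positivity
  intro j h1
  induction hfuel : note.length - j generalizing j with
  | zero =>
      have hge : note.length ≤ j := by omega
      have hdrop : ((PySem.List.enumerate (note.zip note.tail) 0).drop (j-1)) = [] := by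
        apply List.drop_eq_nil_of_le
        rw [PySem.List.length_enumerate, List.length_zip, List.length_tail]
        omega
      rw [hdrop, pvBLoop]
      simp [pvALoop, Nat.not_lt.mpr hge]
  | succ f ih =>
      have hj : j < note.length := by omega
      have hjz : j - 1 < (note.zip note.tail).length := by
        rw [List.length_zip, List.length_tail]; omega
      have e : j - 1 + 1 = j := by omega
      have hdrop : ((PySem.List.enumerate (note.zip note.tail) 0).drop (j-1))
          = (((j-1 : Nat) : Int), (note.getD (j-1) "", note.getD j ""))
              :: ((PySem.List.enumerate (note.zip note.tail) 0).drop j) := by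
        rw [List.drop_eq_getElem_cons (by rw [PySem.List.length_enumerate]; exact hjz)]
        rw [pvPairs_getElem note (j-1) hjz, e]
      set m := min j (note.length - j) with hm
      have hm1 : m ≤ j := Nat.min_le_left _ _
      have hm2 : m ≤ note.length - j := Nat.min_le_right _ _
      -- rewrite the numeric test via the encoding arrays
      have hGj := pvGof_getD b ids j (by omega)
      have hGjm := pvGof_getD b ids (j - m) (by omega)
      have hFjm := pvFof_getD b ids (j + m) (by omega)
      have hFj := pvFof_getD b ids j (by omega)
      have hpw1 : (2:Int) ^ (m * s) = b ^ m := by rw [hbdef, ← pow_mul, Nat.mul_comm]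
      have hpw2 : (2:Int) ^ ((j - m) * s) = b ^ (j - m) := by
        rw [hbdef, ← pow_mul, Nat.mul_comm]
      have hnum : ((pvGof b ids).getD j 0 - (pvGof b ids).getD (j - m) 0 ==
            ((pvFof b ids).getD (j + m) 0 - (pvFof b ids).getD j 0 * 2 ^ (m * s))
              * 2 ^ ((j - m) * s)) = true
          ↔ pvMirror note j := by
        rw [beq_iff_eq, hGj, hGjm, hFjm, hFj, hpw1, hpw2]
        rw [pvCondNum_iff b ids note.length j hlen.symm hb hdig h1 hj]
        rw [pvSlice_iff ids note.length j hlen.symm h1 hj]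
        unfold pvMirror
        constructor
        · intro h s hs
          exact (hiff _ _ (by omega) (by omega)).mp (h s hs)
        · intro h s hs
          exact (hiff _ _ (by omega) (by omega)).mpr (h s hs)
      have e2 : j - 1 + 2 = j + 1 := by omega
      by_cases hcond : pvMirror note j
      · obtain ⟨hA1, hA2⟩ := (pvCondA_iff note j h1 hj).mpr hcond
        have hBtrue := hnum.mpr hcond
        rw [hdrop]
        conv_lhs => rw [pvALoop]
        simp only [Int.toNat_natCast]
        simp only [e2, hA1, hA2, if_true]
        conv_rhs => rw [pvBLoop]
        rw [if_pos hj]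
        simp only [← hm, hBtrue, if_true]
        omega
      · have hBfalse : ((pvGof b ids).getD j 0 - (pvGof b ids).getD (j - m) 0 ==
            ((pvFof b ids).getD (j + m) 0 - (pvFof b ids).getD j 0 * 2 ^ (m * s))
              * 2 ^ ((j - m) * s)) = false := by
          rw [Bool.eq_false_iff]
          intro hx
          exact hcond (hnum.mp hx)
        have hrec : pvALoop note ((PySem.List.enumerate (note.zip note.tail) 0).drop j)
            = pvBLoop s (pvFof b ids) (pvGof b ids) note.length (j+1) := by
          have := ih (j+1) (by omega) (by omega)
          simpa using this
        rw [hdrop]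
        conv_lhs => rw [pvALoop]
        simp only [Int.toNat_natCast, e2]
        conv_rhs => rw [pvBLoop]
        rw [if_pos hj]
        simp only [← hm, hBfalse, Bool.false_eq_true, if_false]
        by_cases hb1 : (note.getD (j-1) "" == note.getD j "") = true
        · have hb2 : (((note.take (j-1)).reverse.zip (note.drop (j+1))).all
              (fun p => p.1 == p.2)) = false := by
            rw [Bool.eq_false_iff]
            intro hx
            exact hcond ((pvCondA_iff note j h1 hj).mp ⟨hb1, hx⟩)
          simp only [hb1, hb2, if_true, Bool.false_eq_true, if_false]
          exact hrec
        · simp only [Bool.eq_false_iff.mpr hb1, Bool.false_eq_true, if_false]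
          exact hrec

-- ===== VERDICT (by name: the statement is the Claim_ definition above) =====
theorem find_row_reflection_spec : Claim_equal_find_row_reflection := by
  intro note _
  show find_row_reflection note = find_row_reflection_alt note
  obtain ⟨hlen, hiff, hdig⟩ := pvIntern_spec note
  set ids := pvBIntern note PySem.Dict.empty [] with hids
  set s : Nat := pvBitLength (ids.length + 1) with hsdef
  set b : Int := (2:Int) ^ s with hbdef
  have hdig' : ∀ x ∈ ids, 0 ≤ x ∧ x < b := by
    intro x hx
    refine ⟨(hdig x hx).1, lt_of_lt_of_le (hdig x hx).2 ?_⟩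
    have h2 : note.length + 1 ≤ 2 ^ s := by
      rw [hsdef, hlen]
      exact le_of_lt (pvBitLength_lt (note.length + 1))
    rw [hbdef]
    have := (Int.ofNat_le).mpr h2
    push_cast at this ⊢
    omega
  have hbuild : pvBuild s ids 0 0 0 [0] [0]
      = (pvFof b ids, pvGof b ids) := by
    have h0 : pvValBE b ([] : List Int) = 0 := rfl
    have h1 : pvValLE b ([] : List Int) = 0 := rfl
    have hF0 : pvFof b ([] : List Int) = [0] := by simp [pvFof, pvValBE]
    have hG0 : pvGof b ([] : List Int) = [0] := by simp [pvGof, pvValLE]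
    have := pvBuild_eq s ids []
    rw [← hbdef, h0, h1, hF0, hG0] at this
    simpa using this
  have halt : find_row_reflection_alt note
      = pvBLoop s (pvFof b ids) (pvGof b ids) ids.length 1 := by
    show pvBLoop s (pvBuild s ids 0 0 0 [0] [0]).1 (pvBuild s ids 0 0 0 [0] [0]).2
        ids.length 1 = _
    rw [hbuild]
  rw [halt, hlen]
  have := pvLoop_eq note ids s hlen hiff hdig' 1 le_rfl
  simpa [find_row_reflection] using this
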